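-- pv_equiv track=rewrite | github.com/AnChanUng/Algorithm | 프로그래머스/1/133499. 옹알이 （2）/옹알이 （2）.py | solution
-- ===== SOURCE A (Python) =====
-- def solution(babbling):
--     answer = 0
--     a = ['aya', 'ye', 'woo', 'ma']
--
--     for b in babbling:
--         for i in a:
--             if i * 2 not in b:
--                 b = b.replace(i, ' ')
--
--         if b.isspace():
--             answer += 1
--     return answer
-- ===== SOURCE B (Python) =====
-- SOUNDS = ['aya', 'ye', 'woo', 'ma']
--
--
-- def _speakable(w):
--     # greedy left-to-right tokenization: each position must start an allowed
--     # sound (sounds have pairwise distinct first letters, so greedy is exact)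
--     # or be a whitespace character.
--     i = 0
--     n = len(w)
--     while i < n:
--         for s in SOUNDS:
--             if w.startswith(s, i):
--                 i += len(s)
--                 break
--         else:
--             if w[i].isspace():
--                 i += 1
--             else:
--                 return False
--     return True
--
--
-- def solution(babbling):
--     count = 0
--     for w in babbling:
--         if w and not any(s + s in w for s in SOUNDS) and _speakable(w):
--             count += 1
--     return count
-- ===== Notes on version B (the rewrite author's own statement) =====
-- stated objective: alternative
-- what changed: A tests each word by destructively replacing every sound with a space (conditioned on its double being absent from the partially-mutated word) and then asking isspace(); B never builds a mutated string: it checks the doubled sounds directly on the original word and then recognizes the word with a greedy left-to-right tokenizer over the four sounds and whitespace characters.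
import Mathlib
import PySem

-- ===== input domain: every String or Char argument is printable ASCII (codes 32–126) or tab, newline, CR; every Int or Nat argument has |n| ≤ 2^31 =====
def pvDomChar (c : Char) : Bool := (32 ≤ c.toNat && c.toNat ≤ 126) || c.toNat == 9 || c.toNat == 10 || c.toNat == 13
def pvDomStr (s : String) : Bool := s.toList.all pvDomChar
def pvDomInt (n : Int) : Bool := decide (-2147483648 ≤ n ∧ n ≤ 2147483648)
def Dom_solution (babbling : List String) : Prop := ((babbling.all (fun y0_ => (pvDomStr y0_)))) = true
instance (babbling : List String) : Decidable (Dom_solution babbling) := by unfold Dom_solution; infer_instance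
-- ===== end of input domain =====

-- B replaces A's conditional replace-with-space pipeline + isspace() test by a direct
-- recognizer: doubled-sound check on the original word plus a greedy tokenizer over the
-- four sounds and whitespace (objective: alternative algorithm, similar cost).
set_option maxRecDepth 4096


-- ===== PORT A =====
def solution (babbling : List String) : Int :=
  babbling.foldl (fun answer b0 =>
    let b := (["aya", "ye", "woo", "ma"] : List String).foldl
      (fun b i => if PySem.Str.isIn (i ++ i) b = false then PySem.Str.replace b i " " else b) b0
    if PySem.Str.strIsspace b then answer + 1 else answer) 0

-- ===== PORT B =====
-- Source B's _speakable: greedy left-to-right scan (the while-loop over an index becomes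
-- structural recursion on the remaining suffix)
def parseB : List Char → Bool
  | [] => true
  | c :: t =>
    if ['a','y','a'].isPrefixOf (c :: t) then parseB (t.drop 2)
    else if ['y','e'].isPrefixOf (c :: t) then parseB (t.drop 1)
    else if ['w','o','o'].isPrefixOf (c :: t) then parseB (t.drop 2)
    else if ['m','a'].isPrefixOf (c :: t) then parseB (t.drop 1)
    else if PySem.Chars.isspace c then parseB t
    else false
termination_by l => l.length
decreasing_by all_goals simp

def solution_alt (babbling : List String) : Int :=
  babbling.foldl (fun count w =>
    if !w.toList.isEmpty
        && !((["aya", "ye", "woo", "ma"] : List String).any (fun s => PySem.Str.isIn (s ++ s) w))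
        && parseB w.toList
    then count + 1 else count) 0

-- ===== PRECONDITION & SPEC =====
def Spec_solution (babbling : List String) (out : Int) : Prop := out = solution_alt babbling
instance (babbling : List String) (out : Int) : Decidable (Spec_solution babbling out) := by unfold Spec_solution; infer_instance

-- ===== CLAIM (what is proved, stated in full; the proofs are below) =====
def Claim_equal_solution : Prop := ∀ (babbling : List String), Dom_solution babbling → Spec_solution babbling (solution babbling)

-- ===== LEMMAS AND PROOFS =====

-- structural form of PySem.Chars.replace with replacement string " "
def rep (p : List Char) : List Char → List Char
  | [] => []
  | c :: t => if p.isPrefixOf (c :: t) then ' ' :: rep p (t.drop (p.length - 1)) else c :: rep p t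
termination_by l => l.length
decreasing_by all_goals simp

theorem rep_go (p : List Char) (hp : p ≠ []) :
    ∀ (fuel : Nat) (l acc : List Char), l.length ≤ fuel →
      PySem.Chars.replace.go p [' '] fuel l acc = acc.reverse ++ rep p l := by
  intro fuel
  induction fuel with
  | zero =>
    intro l acc h
    have : l = [] := by cases l <;> simp_all
    subst this
    simp [PySem.Chars.replace.go, rep]
  | succ n ih =>
    intro l acc h
    cases l with
    | nil => simp [PySem.Chars.replace.go, rep]
    | cons c t =>
      have hp1 : 1 ≤ p.length := by cases p <;> simp_all
      rw [PySem.Chars.replace.go]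
      by_cases hpre : p.isPrefixOf (c :: t)
      · simp only [hpre, if_pos]
        rw [ih]
        · rw [rep]
          simp only [hpre, if_pos]
          have hd : List.drop p.length (c :: t) = List.drop (p.length - 1) t := by
            cases p with
            | nil => exact absurd rfl hp
            | cons a q => simp
          rw [hd]; simp
        · simp at h ⊢
          omega
      · simp only [hpre]
        rw [ih t (c :: acc) (by simp at h; omega), rep]
        simp [hpre]

theorem replace_eq_rep (p : List Char) (hp : p ≠ []) (s : List Char) :
    PySem.Chars.replace s p [' '] = rep p s := by
  rw [PySem.Chars.replace]
  have : p.isEmpty = false := by cases p <;> simp_all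
  rw [this]
  simpa using rep_go p hp s.length s [] le_rfl

theorem prefix_decomp {p : List Char} {c : Char} {t : List Char} (hp : p ≠ [])
    (h : p.isPrefixOf (c :: t) = true) :
    c :: t = p ++ t.drop (p.length - 1) := by
  obtain ⟨rest, hr⟩ := List.isPrefixOf_iff_prefix.mp h
  cases p with
  | nil => exact absurd rfl hp
  | cons a q =>
    simp at hr
    obtain ⟨ha, ht⟩ := hr
    subst ha
    simp [← ht]

theorem rep_ne_nil (p : List Char) (c : Char) (t : List Char) : rep p (c :: t) ≠ [] := by
  rw [rep]; split <;> simp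

theorem head_rep (p : List Char) (c : Char) (t : List Char) :
    ∃ d l, rep p (c :: t) = d :: l ∧ (d = c ∨ d = ' ') := by
  rw [rep]; split
  · exact ⟨' ', _, rfl, Or.inr rfl⟩
  · exact ⟨c, _, rfl, Or.inl rfl⟩

theorem mem_rep {p : List Char} (hp : p ≠ []) {c : Char} {s : List Char}
    (hc : c ∉ p) (h : c ∈ s) : c ∈ rep p s := by
  fun_induction rep p s with
  | case1 => simp_all
  | case2 c0 t hpre ih =>
    have hd := prefix_decomp hp hpre
    rw [hd] at h
    rcases List.mem_append.mp h with h1 | h2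
    · exact absurd h1 hc
    · exact List.mem_cons_of_mem _ (ih h2)
  | case3 c0 t hpre ih =>
    rcases List.mem_cons.mp h with h1 | h2
    · simp [h1]
    · exact List.mem_cons_of_mem _ (ih h2)

theorem prefix_reflect {q : List Char} (hq : ' ' ∉ q) :
    ∀ {p s : List Char}, q <+: rep p s → q <+: s := by
  induction q with
  | nil => intro p s _; exact List.nil_prefix
  | cons c q' ih =>
    intro p s h
    cases s with
    | nil => simp [rep] at h
    | cons c0 t =>
      rw [rep] at h
      split at h
      · obtain ⟨hc, -⟩ := List.cons_prefix_cons.mp h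
        exact absurd (hc ▸ List.mem_cons_self) hq
      · obtain ⟨hc, hq'⟩ := List.cons_prefix_cons.mp h
        subst hc
        exact List.cons_prefix_cons.mpr ⟨rfl, ih (fun hm => hq (List.mem_cons_of_mem _ hm)) hq'⟩

theorem infix_reflect {p : List Char} (hp : p ≠ []) {q : List Char} (hq : ' ' ∉ q) :
    ∀ {s : List Char}, q <:+: rep p s → q <:+: s := by
  intro s
  fun_induction rep p s with
  | case1 => simp
  | case2 c0 t hpre ih =>
    intro h
    rcases List.infix_cons_iff.mp h with h1 | h2
    · cases q with
      | nil => simp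
      | cons a q' =>
        obtain ⟨hc, -⟩ := List.cons_prefix_cons.mp h1
        exact absurd (hc ▸ List.mem_cons_self) hq
    · have := ih h2
      rw [prefix_decomp hp hpre]
      exact this.trans (List.suffix_append _ _).isInfix
  | case3 c0 t hpre ih =>
    intro h
    rcases List.infix_cons_iff.mp h with h1 | h2
    · cases q with
      | nil => simp
      | cons a q' =>
        obtain ⟨hc, hq'⟩ := List.cons_prefix_cons.mp h1
        subst hc
        exact (List.cons_prefix_cons.mpr
          ⟨rfl, prefix_reflect (fun hm => hq (List.mem_cons_of_mem _ hm)) hq'⟩).isInfix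
    · exact (ih h2).trans (List.infix_cons_iff.mpr (Or.inr (List.infix_refl t)))

theorem infix_append_right_of_disjoint {q : List Char} (hne : q ≠ []) :
    ∀ {xs ys : List Char}, (∀ c ∈ q, c ∉ xs) → q <:+: xs ++ ys → q <:+: ys := by
  intro xs
  induction xs with
  | nil => intro ys _ h; simpa using h
  | cons x xs ih =>
    intro ys hd h
    rcases List.infix_cons_iff.mp h with h1 | h2
    · cases q with
      | nil => exact absurd rfl hne
      | cons a q' =>
        obtain ⟨hc, -⟩ := List.cons_prefix_cons.mp h1
        subst hc
        exact absurd List.mem_cons_self (hd a List.mem_cons_self)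
    · exact ih (fun c hc hm => hd c hc (List.mem_cons_of_mem _ hm)) h2

theorem prefix_surv_disjoint {q : List Char} :
    ∀ {p s : List Char}, p ≠ [] → (∀ c ∈ q, c ∉ p) → q <+: s → q <+: rep p s := by
  induction q with
  | nil => intro p s _ _ _; exact List.nil_prefix
  | cons c q' ih =>
    intro p s hp hd h
    cases s with
    | nil => simp at h
    | cons c0 t =>
      obtain ⟨hc, hq'⟩ := List.cons_prefix_cons.mp h
      subst hc
      have hpre : p.isPrefixOf (c :: t) = false := by
        cases p with
        | nil => exact absurd rfl hp
        | cons a pq =>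
          have : a ≠ c := fun hac => hd c List.mem_cons_self (hac ▸ List.mem_cons_self)
          simp only [List.isPrefixOf, Bool.and_eq_false_iff, beq_eq_false_iff_ne, ne_eq]
          exact Or.inl this
      rw [rep]
      simp only [hpre, Bool.false_eq_true, if_false]
      exact List.cons_prefix_cons.mpr
        ⟨rfl, ih hp (fun c hc hm => hd c (List.mem_cons_of_mem _ hc) hm) hq'⟩

theorem infix_surv_disjoint {p : List Char} (hp : p ≠ []) {q : List Char}
    (hd : ∀ c ∈ q, c ∉ p) : ∀ {s : List Char}, q <:+: s → q <:+: rep p s := by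
  intro s
  fun_induction rep p s with
  | case1 => simp
  | case2 c0 t hpre ih =>
    intro h
    by_cases hne : q = []
    · simp [hne]
    · rw [prefix_decomp hp hpre] at h
      exact List.infix_cons_iff.mpr (Or.inr (ih (infix_append_right_of_disjoint hne hd h)))
  | case3 c0 t hpre ih =>
    intro h
    rcases List.infix_cons_iff.mp h with h1 | h2
    · exact (prefix_surv_disjoint hp hd h1).isInfix.trans
        (by rw [rep]; simp [hpre])
    · exact (ih h2).trans (List.infix_cons_iff.mpr (Or.inr (List.infix_refl _)))

theorem rep_pass {a c : Char} {q t : List Char} (hac : a ≠ c) :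
    rep (a :: q) (c :: t) = c :: rep (a :: q) t := by
  rw [rep]
  have h : (a :: q).isPrefixOf (c :: t) = false := by
    simp only [List.isPrefixOf, Bool.and_eq_false_iff, beq_eq_false_iff_ne, ne_eq]
    exact Or.inl hac
  simp [h]

theorem surv_ye_ya : ∀ {s : List Char}, ['y','a'] <:+: s → ['y','a'] <:+: rep ['y','e'] s := by
  intro s
  fun_induction rep (['y','e'] : List Char) s with
  | case1 => intro h; simp at h
  | case2 c0 t hpre ih =>
    intro h
    obtain ⟨rest, hr⟩ := List.isPrefixOf_iff_prefix.mp hpre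
    simp at hr
    obtain ⟨hc0, ht⟩ := hr
    subst hc0; subst ht
    rcases List.infix_cons_iff.mp h with h1 | h2
    · simp [List.cons_prefix_cons] at h1
    · rcases List.infix_cons_iff.mp h2 with h3 | h4
      · simp [List.cons_prefix_cons] at h3
      · exact List.infix_cons_iff.mpr (Or.inr (ih (by simpa using h4)))
  | case3 c0 t hpre ih =>
    intro h
    rcases List.infix_cons_iff.mp h with h1 | h2
    · obtain ⟨hc0, h1'⟩ := List.cons_prefix_cons.mp h1
      subst hc0
      cases t with
      | nil => simp at h1'
      | cons c1 t2 =>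
        obtain ⟨hc1, -⟩ := List.cons_prefix_cons.mp h1'
        subst hc1
        rw [rep_pass (by decide)]
        exact (List.cons_prefix_cons.mpr ⟨rfl,
          List.cons_prefix_cons.mpr ⟨rfl, List.nil_prefix⟩⟩).isInfix
    · exact List.infix_cons_iff.mpr (Or.inr (ih h2))

theorem surv_ma_ya : ∀ {s : List Char}, ['y','a'] <:+: s → ['y','a'] <:+: rep ['m','a'] s := by
  intro s
  fun_induction rep (['m','a'] : List Char) s with
  | case1 => intro h; simp at h
  | case2 c0 t hpre ih =>
    intro h
    obtain ⟨rest, hr⟩ := List.isPrefixOf_iff_prefix.mp hpre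
    simp at hr
    obtain ⟨hc0, ht⟩ := hr
    subst hc0; subst ht
    rcases List.infix_cons_iff.mp h with h1 | h2
    · simp [List.cons_prefix_cons] at h1
    · rcases List.infix_cons_iff.mp h2 with h3 | h4
      · simp [List.cons_prefix_cons] at h3
      · exact List.infix_cons_iff.mpr (Or.inr (ih (by simpa using h4)))
  | case3 c0 t hpre ih =>
    intro h
    rcases List.infix_cons_iff.mp h with h1 | h2
    · obtain ⟨hc0, h1'⟩ := List.cons_prefix_cons.mp h1
      subst hc0
      cases t with
      | nil => simp at h1'
      | cons c1 t2 =>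
        obtain ⟨hc1, -⟩ := List.cons_prefix_cons.mp h1'
        subst hc1
        rw [rep_pass (by decide)]
        exact (List.cons_prefix_cons.mpr ⟨rfl,
          List.cons_prefix_cons.mpr ⟨rfl, List.nil_prefix⟩⟩).isInfix
    · exact List.infix_cons_iff.mpr (Or.inr (ih h2))

theorem surv_aya_yeye :
    ∀ {s : List Char}, ['y','e','y','e'] <:+: s → ['y','e','y','e'] <:+: rep ['a','y','a'] s := by
  intro s
  fun_induction rep (['a','y','a'] : List Char) s with
  | case1 => intro h; simp at h
  | case2 c0 t hpre ih =>
    intro h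
    obtain ⟨rest, hr⟩ := List.isPrefixOf_iff_prefix.mp hpre
    simp at hr
    obtain ⟨hc0, ht⟩ := hr
    subst hc0; subst ht
    rcases List.infix_cons_iff.mp h with h1 | h2
    · simp [List.cons_prefix_cons] at h1
    · rcases List.infix_cons_iff.mp h2 with h3 | h4
      · simp [List.cons_prefix_cons] at h3
      · rcases List.infix_cons_iff.mp h4 with h5 | h6
        · simp [List.cons_prefix_cons] at h5
        · exact List.infix_cons_iff.mpr (Or.inr (ih (by simpa using h6)))
  | case3 c0 t hpre ih =>
    intro h
    rcases List.infix_cons_iff.mp h with h1 | h2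
    · obtain ⟨hc0, h1'⟩ := List.cons_prefix_cons.mp h1
      subst hc0
      cases t with
      | nil => simp at h1'
      | cons c1 t2 =>
        obtain ⟨hc1, h1''⟩ := List.cons_prefix_cons.mp h1'
        subst hc1
        cases t2 with
        | nil => simp at h1''
        | cons c2 t3 =>
          obtain ⟨hc2, h1'''⟩ := List.cons_prefix_cons.mp h1''
          subst hc2
          cases t3 with
          | nil => simp at h1'''
          | cons c3 t4 =>
            obtain ⟨hc3, -⟩ := List.cons_prefix_cons.mp h1'''
            subst hc3
            rw [rep_pass (by decide), rep_pass (by decide), rep_pass (by decide)]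
            exact (List.cons_prefix_cons.mpr ⟨rfl, List.cons_prefix_cons.mpr ⟨rfl,
              List.cons_prefix_cons.mpr ⟨rfl, List.cons_prefix_cons.mpr
                ⟨rfl, List.nil_prefix⟩⟩⟩⟩).isInfix
    · exact List.infix_cons_iff.mpr (Or.inr (ih h2))

def r3 (s : List Char) : List Char := rep ['w','o','o'] (rep ['y','e'] (rep ['a','y','a'] s))
def r4 (s : List Char) : List Char := rep ['m','a'] (r3 s)

theorem rep_nil (p : List Char) : rep p [] = [] := by rw [rep]

theorem rep_pass' {p : List Char} {c : Char} {t : List Char}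
    (h : p.isPrefixOf (c :: t) = false) : rep p (c :: t) = c :: rep p t := by
  rw [rep]; simp [h]

theorem rep_match_aya (t : List Char) :
    rep ['a','y','a'] ('a'::'y'::'a'::t) = ' ' :: rep ['a','y','a'] t := by
  rw [rep]; simp [List.isPrefixOf]

theorem rep_match_ye (t : List Char) :
    rep ['y','e'] ('y'::'e'::t) = ' ' :: rep ['y','e'] t := by
  rw [rep]; simp [List.isPrefixOf]

theorem rep_match_woo (t : List Char) :
    rep ['w','o','o'] ('w'::'o'::'o'::t) = ' ' :: rep ['w','o','o'] t := by
  rw [rep]; simp [List.isPrefixOf]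

theorem rep_match_ma (t : List Char) :
    rep ['m','a'] ('m'::'a'::t) = ' ' :: rep ['m','a'] t := by
  rw [rep]; simp [List.isPrefixOf]

theorem r4_nil : r4 [] = [] := by simp [r4, r3, rep_nil]

theorem r3_pass {c : Char} (t : List Char) (hca : c ≠ 'a') (hcy : c ≠ 'y') (hcw : c ≠ 'w') :
    r3 (c :: t) = c :: r3 t := by
  simp [r3, rep_pass (Ne.symm hca), rep_pass (Ne.symm hcy), rep_pass (Ne.symm hcw)]

theorem r4_pass {c : Char} (t : List Char) (hca : c ≠ 'a') (hcy : c ≠ 'y') (hcw : c ≠ 'w')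
    (hcm : c ≠ 'm') : r4 (c :: t) = c :: r4 t := by
  simp [r4, r3_pass t hca hcy hcw, rep_pass (Ne.symm hcm)]

theorem r3_aya (t : List Char) : r3 ('a'::'y'::'a'::t) = ' ' :: r3 t := by
  simp [r3, rep_match_aya, rep_pass (by decide : 'y' ≠ ' '), rep_pass (by decide : 'w' ≠ ' ')]

theorem r3_ye (t : List Char) : r3 ('y'::'e'::t) = ' ' :: r3 t := by
  simp [r3, rep_pass (by decide : 'a' ≠ 'y'), rep_pass (by decide : 'a' ≠ 'e'), rep_match_ye,
    rep_pass (by decide : 'w' ≠ ' ')]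

theorem r3_woo (t : List Char) : r3 ('w'::'o'::'o'::t) = ' ' :: r3 t := by
  simp [r3, rep_pass (by decide : 'a' ≠ 'w'), rep_pass (by decide : 'a' ≠ 'o'),
    rep_pass (by decide : 'y' ≠ 'w'), rep_pass (by decide : 'y' ≠ 'o'), rep_match_woo]

theorem r3_ma {t : List Char} (h : ¬ ['y','a'] <+: t) : r3 ('m'::'a'::t) = 'm'::'a':: r3 t := by
  have hpre : (['a','y','a'] : List Char).isPrefixOf ('a' :: t) = false := by
    rw [Bool.eq_false_iff]
    intro hc
    exact h (List.cons_prefix_cons.mp (List.isPrefixOf_iff_prefix.mp hc)).2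
  simp [r3, rep_pass (by decide : 'a' ≠ 'm'), rep_pass' hpre,
    rep_pass (by decide : 'y' ≠ 'm'), rep_pass (by decide : 'y' ≠ 'a'),
    rep_pass (by decide : 'w' ≠ 'm'), rep_pass (by decide : 'w' ≠ 'a')]

theorem r4_aya (t : List Char) : r4 ('a'::'y'::'a'::t) = ' ' :: r4 t := by
  simp [r4, r3_aya, rep_pass (by decide : 'm' ≠ ' ')]

theorem r4_ye (t : List Char) : r4 ('y'::'e'::t) = ' ' :: r4 t := by
  simp [r4, r3_ye, rep_pass (by decide : 'm' ≠ ' ')]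

theorem r4_woo (t : List Char) : r4 ('w'::'o'::'o'::t) = ' ' :: r4 t := by
  simp [r4, r3_woo, rep_pass (by decide : 'm' ≠ ' ')]

theorem r4_ma {t : List Char} (h : ¬ ['y','a'] <+: t) : r4 ('m'::'a'::t) = ' ' :: r4 t := by
  simp [r4, r3_ma h, rep_match_ma]

theorem isspace_not_letter {c : Char} (h : PySem.Chars.isspace c = true) :
    c ≠ 'a' ∧ c ≠ 'y' ∧ c ≠ 'w' ∧ c ≠ 'm' := by
  refine ⟨?_, ?_, ?_, ?_⟩ <;> (rintro rfl; revert h; decide)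

theorem parseB_ya (u : List Char) : parseB ('y'::'a'::u) = false := by
  rw [parseB]
  simp [List.isPrefixOf, PySem.Chars.isspace]

theorem not_ya_of_parseB {t : List Char} (h : parseB t = true) : ¬ ['y','a'] <+: t := by
  intro ⟨rest, hr⟩
  rw [← hr] at h
  simp [parseB_ya] at h

theorem parse_to_spaces : ∀ (s : List Char), parseB s = true →
    (r4 s).all PySem.Chars.isspace = true := by
  intro s
  fun_induction parseB s with
  | case1 => intro _; simp [r4_nil]
  | case2 c t h1 ih =>
    intro h
    obtain ⟨rest, hr⟩ := List.isPrefixOf_iff_prefix.mp h1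
    simp at hr
    obtain ⟨hc, ht⟩ := hr
    subst hc; subst ht
    simp only [List.drop_succ_cons, List.drop_zero] at ih h
    rw [r4_aya]
    simp [ih h, (by decide : PySem.Chars.isspace ' ' = true)]
  | case3 c t h1 h2 ih =>
    intro h
    obtain ⟨rest, hr⟩ := List.isPrefixOf_iff_prefix.mp h2
    simp at hr
    obtain ⟨hc, ht⟩ := hr
    subst hc; subst ht
    simp only [List.drop_succ_cons, List.drop_zero] at ih h
    rw [r4_ye]
    simp [ih h, (by decide : PySem.Chars.isspace ' ' = true)]
  | case4 c t h1 h2 h3 ih =>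
    intro h
    obtain ⟨rest, hr⟩ := List.isPrefixOf_iff_prefix.mp h3
    simp at hr
    obtain ⟨hc, ht⟩ := hr
    subst hc; subst ht
    simp only [List.drop_succ_cons, List.drop_zero] at ih h
    rw [r4_woo]
    simp [ih h, (by decide : PySem.Chars.isspace ' ' = true)]
  | case5 c t h1 h2 h3 h4 ih =>
    intro h
    obtain ⟨rest, hr⟩ := List.isPrefixOf_iff_prefix.mp h4
    simp at hr
    obtain ⟨hc, ht⟩ := hr
    subst hc; subst ht
    simp only [List.drop_succ_cons, List.drop_zero] at ih h
    rw [r4_ma (not_ya_of_parseB h)]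
    simp [ih h, (by decide : PySem.Chars.isspace ' ' = true)]
  | case6 c t h1 h2 h3 h4 h5 ih =>
    intro h
    obtain ⟨hca, hcy, hcw, hcm⟩ := isspace_not_letter h5
    rw [r4_pass t hca hcy hcw hcm]
    simp [h5, ih h]
  | case7 c t h1 h2 h3 h4 h5 =>
    intro h
    simp at h

theorem head2 (c : Char) (t : List Char) :
    ∃ d l, rep ['y','e'] (rep ['a','y','a'] (c :: t)) = d :: l ∧ (d = c ∨ d = ' ') := by
  obtain ⟨d1, l1, h1, hd1⟩ := head_rep ['a','y','a'] c t
  obtain ⟨d2, l2, h2, hd2⟩ := head_rep ['y','e'] d1 l1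
  refine ⟨d2, l2, by rw [h1, h2], ?_⟩
  rcases hd2 with h | h
  · rcases hd1 with h' | h' <;> simp [h, h']
  · simp [h]

theorem head3 (c : Char) (t : List Char) :
    ∃ d l, r3 (c :: t) = d :: l ∧ (d = c ∨ d = ' ') := by
  obtain ⟨d2, l2, h2, hd2⟩ := head2 c t
  obtain ⟨d3, l3, h3, hd3⟩ := head_rep ['w','o','o'] d2 l2
  refine ⟨d3, l3, by rw [r3, h2, h3], ?_⟩
  rcases hd3 with h | h
  · rcases hd2 with h' | h' <;> simp [h, h']
  · simp [h]

theorem surv_a {t : List Char} (h : ¬ ['y','a'] <+: t) : r4 ('a' :: t) = 'a' :: r4 t := by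
  have hpre : (['a','y','a'] : List Char).isPrefixOf ('a' :: t) = false := by
    rw [Bool.eq_false_iff]
    intro hc
    exact h (List.cons_prefix_cons.mp (List.isPrefixOf_iff_prefix.mp hc)).2
  simp [r4, r3, rep_pass' hpre, rep_pass (by decide : 'y' ≠ 'a'),
    rep_pass (by decide : 'w' ≠ 'a'), rep_pass (by decide : 'm' ≠ 'a')]

theorem surv_y {t : List Char} (h : t.head? ≠ some 'e') : r4 ('y' :: t) = 'y' :: r4 t := by
  have h1 : rep ['a','y','a'] ('y' :: t) = 'y' :: rep ['a','y','a'] t :=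
    rep_pass (by decide)
  have hpre : (['y','e'] : List Char).isPrefixOf ('y' :: rep ['a','y','a'] t) = false := by
    cases t with
    | nil => simp [rep_nil, List.isPrefixOf]
    | cons c1 t2 =>
      obtain ⟨d, l, hd, hdd⟩ := head_rep ['a','y','a'] c1 t2
      have hde : d ≠ 'e' := by
        rcases hdd with h' | h' <;> subst h'
        · exact fun he => h (by simp [he])
        · decide
      simp [hd, List.isPrefixOf, beq_eq_false_iff_ne.mpr (Ne.symm hde)]
  simp [r4, r3, h1, rep_pass' hpre, rep_pass (by decide : 'w' ≠ 'y'),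
    rep_pass (by decide : 'm' ≠ 'y')]

theorem surv_w {t : List Char} (h : ∀ u, t ≠ 'o' :: 'o' :: u) : r4 ('w' :: t) = 'w' :: r4 t := by
  have h1 : rep ['a','y','a'] ('w' :: t) = 'w' :: rep ['a','y','a'] t := rep_pass (by decide)
  have h2 : rep ['y','e'] ('w' :: rep ['a','y','a'] t)
      = 'w' :: rep ['y','e'] (rep ['a','y','a'] t) := rep_pass (by decide)
  have hpre : (['w','o','o'] : List Char).isPrefixOf
      ('w' :: rep ['y','e'] (rep ['a','y','a'] t)) = false := by
    cases t with
    | nil => simp [rep_nil, List.isPrefixOf]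
    | cons c1 t2 =>
      by_cases hc1 : c1 = 'o'
      · subst hc1
        have ha : rep ['a','y','a'] ('o' :: t2) = 'o' :: rep ['a','y','a'] t2 :=
          rep_pass (by decide)
        have hy : rep ['y','e'] ('o' :: rep ['a','y','a'] t2)
            = 'o' :: rep ['y','e'] (rep ['a','y','a'] t2) := rep_pass (by decide)
        cases t2 with
        | nil =>
          have ho : rep ['y','e'] ['o'] = ['o'] := by rw [rep_pass (by decide), rep_nil]
          simp [ha, rep_nil, ho, List.isPrefixOf]
        | cons c2 t3 =>
          have hc2 : c2 ≠ 'o' := fun he => h t3 (by simp [he])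
          obtain ⟨d, l, hd, hdd⟩ := head2 c2 t3
          have hdo : d ≠ 'o' := by
            rcases hdd with h' | h' <;> subst h'
            · exact hc2
            · decide
          simp [ha, hy, hd, List.isPrefixOf, beq_eq_false_iff_ne.mpr (Ne.symm hdo)]
      · obtain ⟨d, l, hd, hdd⟩ := head2 c1 t2
        have hdo : d ≠ 'o' := by
          rcases hdd with h' | h' <;> subst h'
          · exact hc1
          · decide
        simp [hd, List.isPrefixOf, beq_eq_false_iff_ne.mpr (Ne.symm hdo)]
  simp [r4, r3, h1, h2, rep_pass' hpre, rep_pass (by decide : 'm' ≠ 'w')]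

theorem surv_m1 {t : List Char} (h : t.head? ≠ some 'a') : r4 ('m' :: t) = 'm' :: r4 t := by
  have h3 : r3 ('m' :: t) = 'm' :: r3 t := r3_pass t (by decide) (by decide) (by decide)
  have hpre : (['m','a'] : List Char).isPrefixOf ('m' :: r3 t) = false := by
    cases t with
    | nil => simp [r3, rep_nil, List.isPrefixOf]
    | cons c1 t2 =>
      obtain ⟨d, l, hd, hdd⟩ := head3 c1 t2
      have hda : d ≠ 'a' := by
        rcases hdd with h' | h' <;> subst h'
        · exact fun he => h (by simp [he])
        · decide
      simp [hd, List.isPrefixOf, beq_eq_false_iff_ne.mpr (Ne.symm hda)]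
  simp [r4, h3, rep_pass' hpre]

theorem surv_m2 (u : List Char) : ∃ l, r4 ('m'::'a'::'y'::'a'::u) = 'm' :: ' ' :: l := by
  have h1 : rep ['a','y','a'] ('m'::'a'::'y'::'a'::u)
      = 'm' :: ' ' :: rep ['a','y','a'] u := by
    rw [rep_pass (by decide : 'a' ≠ 'm'), rep_match_aya]
  have hpre : (['m','a'] : List Char).isPrefixOf
      ('m' :: ' ' :: rep ['w','o','o'] (rep ['y','e'] (rep ['a','y','a'] u))) = false := by
    simp [List.isPrefixOf]
  exact ⟨rep ['m','a'] (rep ['w','o','o'] (rep ['y','e'] (rep ['a','y','a'] u))),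
    by simp [r4, r3, h1, rep_pass (by decide : 'y' ≠ 'm'),
      rep_pass (by decide : 'y' ≠ ' '), rep_pass (by decide : 'w' ≠ 'm'),
      rep_pass (by decide : 'w' ≠ ' '), rep_pass' hpre, rep_pass (by decide : 'm' ≠ ' ')]⟩

theorem spaces_to_parse : ∀ (n : Nat) (s : List Char), s.length ≤ n →
    (r4 s).all PySem.Chars.isspace = true → parseB s = true := by
  intro n
  induction n with
  | zero =>
    intro s hl _
    have hs : s = [] := by cases s <;> simp_all
    subst hs
    simp [parseB]
  | succ n ih =>
    intro s hl H
    cases s with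
    | nil => simp [parseB]
    | cons c t =>
      by_cases hca : c = 'a'
      · subst hca
        by_cases hya : ['y','a'] <+: t
        · obtain ⟨u, hu⟩ := hya
          subst hu
          simp only [List.cons_append, List.nil_append] at H hl ⊢
          rw [r4_aya, List.all_cons, Bool.and_eq_true] at H
          have hp := ih u (by simp at hl ⊢; omega) H.2
          rw [parseB]
          simp [List.isPrefixOf, hp]
        · rw [surv_a hya, List.all_cons, Bool.and_eq_true] at H
          exact absurd H.1 (by decide)
      · by_cases hcy : c = 'y'
        · subst hcy
          rcases t with _ | ⟨c1, t2⟩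
          · rw [surv_y (by simp), List.all_cons, Bool.and_eq_true] at H
            exact absurd H.1 (by decide)
          · by_cases hce : c1 = 'e'
            · subst hce
              rw [r4_ye, List.all_cons, Bool.and_eq_true] at H
              have hp := ih t2 (by simp at hl ⊢; omega) H.2
              rw [parseB]
              simp [List.isPrefixOf, hp]
            · rw [surv_y (by simp [hce]), List.all_cons, Bool.and_eq_true] at H
              exact absurd H.1 (by decide)
        · by_cases hcw : c = 'w'
          · subst hcw
            by_cases hoo : ∃ u, t = 'o' :: 'o' :: u
            · obtain ⟨u, hu⟩ := hoo
              subst hu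
              rw [r4_woo, List.all_cons, Bool.and_eq_true] at H
              have hp := ih u (by simp at hl ⊢; omega) H.2
              rw [parseB]
              simp [List.isPrefixOf, hp]
            · rw [surv_w (fun u hu => hoo ⟨u, hu⟩), List.all_cons, Bool.and_eq_true] at H
              exact absurd H.1 (by decide)
          · by_cases hcm : c = 'm'
            · subst hcm
              rcases t with _ | ⟨c1, t1⟩
              · rw [surv_m1 (by simp), List.all_cons, Bool.and_eq_true] at H
                exact absurd H.1 (by decide)
              · by_cases hc1 : c1 = 'a'
                · subst hc1
                  by_cases hya : ['y','a'] <+: t1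
                  · obtain ⟨u, hu⟩ := hya
                    subst hu
                    simp only [List.cons_append, List.nil_append] at H hl ⊢
                    obtain ⟨l, hl2⟩ := surv_m2 u
                    rw [hl2, List.all_cons, Bool.and_eq_true] at H
                    exact absurd H.1 (by decide)
                  · rw [r4_ma hya, List.all_cons, Bool.and_eq_true] at H
                    have hp := ih t1 (by simp at hl ⊢; omega) H.2
                    rw [parseB]
                    simp [List.isPrefixOf, hp]
                · rw [surv_m1 (by simp [hc1]), List.all_cons, Bool.and_eq_true] at H
                  exact absurd H.1 (by decide)
            · rw [r4_pass t hca hcy hcw hcm, List.all_cons, Bool.and_eq_true] at H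
              obtain ⟨hsp, hrest⟩ := H
              have hp := ih t (by simp at hl ⊢; omega) hrest
              rw [parseB]
              have c1 : (['a','y','a'] : List Char).isPrefixOf (c :: t) = false := by
                simp [List.isPrefixOf, beq_eq_false_iff_ne.mpr (fun h => hca h.symm)]
              have c2 : (['y','e'] : List Char).isPrefixOf (c :: t) = false := by
                simp [List.isPrefixOf, beq_eq_false_iff_ne.mpr (fun h => hcy h.symm)]
              have c3 : (['w','o','o'] : List Char).isPrefixOf (c :: t) = false := by
                simp [List.isPrefixOf, beq_eq_false_iff_ne.mpr (fun h => hcw h.symm)]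
              have c4 : (['m','a'] : List Char).isPrefixOf (c :: t) = false := by
                simp [List.isPrefixOf, beq_eq_false_iff_ne.mpr (fun h => hcm h.symm)]
              simp [c1, c2, c3, c4, hsp, hp]

theorem r4_ne_nil (c : Char) (t : List Char) : r4 (c :: t) ≠ [] := by
  obtain ⟨d, l, h3, -⟩ := head3 c t
  rw [r4, h3]
  exact rep_ne_nil _ _ _

theorem mama_parse_surv : ∀ (s : List Char), parseB s = true →
    ['m','a','m','a'] <:+: s → ['m','a','m','a'] <:+: r3 s := by
  intro s
  fun_induction parseB s with
  | case1 => intro _ h; simp at h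
  | case2 c t h1 ih =>
    intro hp h
    obtain ⟨rest, hr⟩ := List.isPrefixOf_iff_prefix.mp h1
    simp at hr
    obtain ⟨hc, ht⟩ := hr
    subst hc; subst ht
    simp only [List.drop_succ_cons, List.drop_zero] at ih hp
    rw [r3_aya]
    rcases List.infix_cons_iff.mp h with h' | h -- peel 'a'
    · simp [List.cons_prefix_cons] at h'
    rcases List.infix_cons_iff.mp h with h' | h -- peel 'y'
    · simp [List.cons_prefix_cons] at h'
    rcases List.infix_cons_iff.mp h with h' | h -- peel 'a'
    · simp [List.cons_prefix_cons] at h'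
    exact List.infix_cons_iff.mpr (Or.inr (ih hp h))
  | case3 c t h1 h2 ih =>
    intro hp h
    obtain ⟨rest, hr⟩ := List.isPrefixOf_iff_prefix.mp h2
    simp at hr
    obtain ⟨hc, ht⟩ := hr
    subst hc; subst ht
    simp only [List.drop_succ_cons, List.drop_zero] at ih hp
    rw [r3_ye]
    rcases List.infix_cons_iff.mp h with h' | h
    · simp [List.cons_prefix_cons] at h'
    rcases List.infix_cons_iff.mp h with h' | h
    · simp [List.cons_prefix_cons] at h'
    exact List.infix_cons_iff.mpr (Or.inr (ih hp h))
  | case4 c t h1 h2 h3 ih =>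
    intro hp h
    obtain ⟨rest, hr⟩ := List.isPrefixOf_iff_prefix.mp h3
    simp at hr
    obtain ⟨hc, ht⟩ := hr
    subst hc; subst ht
    simp only [List.drop_succ_cons, List.drop_zero] at ih hp
    rw [r3_woo]
    rcases List.infix_cons_iff.mp h with h' | h
    · simp [List.cons_prefix_cons] at h'
    rcases List.infix_cons_iff.mp h with h' | h
    · simp [List.cons_prefix_cons] at h'
    rcases List.infix_cons_iff.mp h with h' | h
    · simp [List.cons_prefix_cons] at h'
    exact List.infix_cons_iff.mpr (Or.inr (ih hp h))
  | case5 c t h1 h2 h3 h4 ih =>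
    intro hp h
    obtain ⟨rest, hr⟩ := List.isPrefixOf_iff_prefix.mp h4
    simp at hr
    obtain ⟨hc, ht⟩ := hr
    subst hc; subst ht
    simp only [List.drop_succ_cons, List.drop_zero] at ih hp
    rw [r3_ma (not_ya_of_parseB hp)]
    rcases List.infix_cons_iff.mp h with h' | h
    · -- ['m','a','m','a'] <+: 'm'::'a'::rest
      obtain ⟨-, h'⟩ := List.cons_prefix_cons.mp h'
      obtain ⟨-, h'⟩ := List.cons_prefix_cons.mp h'
      -- h' : ['m','a'] <+: rest
      obtain ⟨rest2, hr2⟩ := h'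
      have hrest : rest = 'm'::'a'::rest2 := by simpa using hr2.symm
      subst hrest
      have hp2 : parseB rest2 = true := by
        rw [parseB.eq_def] at hp
        simpa [List.isPrefixOf] using hp
      rw [r3_ma (not_ya_of_parseB hp2)]
      exact (List.cons_prefix_cons.mpr ⟨rfl, List.cons_prefix_cons.mpr ⟨rfl,
        List.cons_prefix_cons.mpr ⟨rfl, List.cons_prefix_cons.mpr
          ⟨rfl, List.nil_prefix⟩⟩⟩⟩).isInfix
    rcases List.infix_cons_iff.mp h with h' | h
    · simp [List.cons_prefix_cons] at h'
    exact List.infix_cons_iff.mpr (Or.inr (List.infix_cons_iff.mpr (Or.inr (ih hp h))))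
  | case6 c t h1 h2 h3 h4 h5 ih =>
    intro hp h
    obtain ⟨hca, hcy, hcw, -⟩ := isspace_not_letter h5
    have hcm : c ≠ 'm' := by rintro rfl; revert h5; decide
    rw [r3_pass t hca hcy hcw]
    rcases List.infix_cons_iff.mp h with h' | h
    · obtain ⟨hc, -⟩ := List.cons_prefix_cons.mp h'
      exact absurd hc.symm hcm
    exact List.infix_cons_iff.mpr (Or.inr (ih hp h))
  | case7 c t h1 h2 h3 h4 h5 =>
    intro hp
    simp at hp

def pstep (p : List Char) (s : List Char) : List Char :=
  if PySem.Chars.isIn (p ++ p) s = false then rep p s else s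

def pipe (s : List Char) : List Char :=
  pstep ['m','a'] (pstep ['w','o','o'] (pstep ['y','e'] (pstep ['a','y','a'] s)))

theorem pipe_main (s : List Char) :
    PySem.Chars.strIsspace (pipe s)
      = (!s.isEmpty
          && !(PySem.Chars.isIn ['a','y','a','a','y','a'] s
              || PySem.Chars.isIn ['y','e','y','e'] s
              || PySem.Chars.isIn ['w','o','o','w','o','o'] s
              || PySem.Chars.isIn ['m','a','m','a'] s)
          && parseB s) := by
  by_cases hd : (PySem.Chars.isIn ['a','y','a','a','y','a'] s
      || PySem.Chars.isIn ['y','e','y','e'] s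
      || PySem.Chars.isIn ['w','o','o','w','o','o'] s
      || PySem.Chars.isIn ['m','a','m','a'] s) = false
  · rw [Bool.or_eq_false_iff, Bool.or_eq_false_iff, Bool.or_eq_false_iff] at hd
    obtain ⟨⟨⟨h1, h2⟩, h3⟩, h4⟩ := hd
    have hd : (PySem.Chars.isIn ['a','y','a','a','y','a'] s
        || PySem.Chars.isIn ['y','e','y','e'] s
        || PySem.Chars.isIn ['w','o','o','w','o','o'] s
        || PySem.Chars.isIn ['m','a','m','a'] s) = false := by
      simp [h1, h2, h3, h4]
    have e1 : pstep ['a','y','a'] s = rep ['a','y','a'] s := by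
      simp [pstep, h1]
    have c2 : PySem.Chars.isIn ['y','e','y','e'] (rep ['a','y','a'] s) = false := by
      rw [PySem.Chars.isIn_eq_false_iff]
      intro hin
      exact ((PySem.Chars.isIn_eq_false_iff _ _).mp h2) (infix_reflect (by decide) (by decide) hin)
    have e2 : pstep ['y','e'] (rep ['a','y','a'] s) = rep ['y','e'] (rep ['a','y','a'] s) := by
      simp [pstep, c2]
    have c3 : PySem.Chars.isIn ['w','o','o','w','o','o']
        (rep ['y','e'] (rep ['a','y','a'] s)) = false := by
      rw [PySem.Chars.isIn_eq_false_iff]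
      intro hin
      exact ((PySem.Chars.isIn_eq_false_iff _ _).mp h3)
        (infix_reflect (by decide) (by decide) (infix_reflect (by decide) (by decide) hin))
    have e3 : pstep ['w','o','o'] (rep ['y','e'] (rep ['a','y','a'] s)) = r3 s := by
      simp [pstep, c3, r3]
    have c4 : PySem.Chars.isIn ['m','a','m','a'] (r3 s) = false := by
      rw [PySem.Chars.isIn_eq_false_iff]
      intro hin
      refine ((PySem.Chars.isIn_eq_false_iff _ _).mp h4) ?_
      exact infix_reflect (by decide) (by decide)
        (infix_reflect (by decide) (by decide) (infix_reflect (by decide) (by decide) hin))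
    have e4 : pipe s = r4 s := by
      rw [pipe, e1, e2, e3, pstep, r4]
      simp [c4]
    rw [e4, hd]
    cases s with
    | nil => simp [r4_nil, PySem.Chars.strIsspace]
    | cons c t =>
      have hne := r4_ne_nil c t
      have hie : (r4 (c :: t)).isEmpty = false := by
        cases hr : r4 (c :: t) with
        | nil => exact absurd hr hne
        | cons d l => simp
      rw [PySem.Chars.strIsspace, hie]
      simp only [Bool.not_false, Bool.true_and, Bool.and_true, List.isEmpty_cons]
      cases hpb : parseB (c :: t) with
      | true => simp [parse_to_spaces _ hpb]
      | false =>
        cases hall : (r4 (c :: t)).all PySem.Chars.isspace with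
        | true =>
          rw [spaces_to_parse (c :: t).length (c :: t) le_rfl hall] at hpb
          exact absurd hpb (by simp)
        | false => rfl
  · have hd' : (PySem.Chars.isIn ['a','y','a','a','y','a'] s
        || PySem.Chars.isIn ['y','e','y','e'] s
        || PySem.Chars.isIn ['w','o','o','w','o','o'] s
        || PySem.Chars.isIn ['m','a','m','a'] s) = true := by
      cases h : (PySem.Chars.isIn ['a','y','a','a','y','a'] s
        || PySem.Chars.isIn ['y','e','y','e'] s
        || PySem.Chars.isIn ['w','o','o','w','o','o'] s
        || PySem.Chars.isIn ['m','a','m','a'] s) with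
      | false => exact absurd h hd
      | true => rfl
    rw [hd']
    simp only [Bool.not_true, Bool.and_false, Bool.false_and]
    cases hss : PySem.Chars.strIsspace (pipe s) with
    | false => rfl
    | true =>
      exfalso
      have hmem : ∀ c ∈ pipe s, PySem.Chars.isspace c = true := by
        rw [PySem.Chars.strIsspace] at hss
        intro c hc
        exact List.all_eq_true.mp (Bool.and_eq_true_iff.mp hss).2 c hc
      have h4 : PySem.Chars.isIn ['m','a','m','a']
          (pstep ['w','o','o'] (pstep ['y','e'] (pstep ['a','y','a'] s))) = false := by
        cases h4' : PySem.Chars.isIn ['m','a','m','a']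
            (pstep ['w','o','o'] (pstep ['y','e'] (pstep ['a','y','a'] s))) with
        | false => rfl
        | true =>
          have hpe : pipe s = pstep ['w','o','o'] (pstep ['y','e'] (pstep ['a','y','a'] s)) := by
            rw [pipe, pstep]
            simp only [List.cons_append, List.nil_append, h4']
            simp
          have hm : ('m' : Char) ∈ pipe s := by
            rw [hpe]
            exact ((PySem.Chars.isIn_iff_infix _ _).mp h4').subset (by simp)
          exact absurd (hmem _ hm) (by decide)
      have epipe : pipe s = rep ['m','a']
          (pstep ['w','o','o'] (pstep ['y','e'] (pstep ['a','y','a'] s))) := by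
        rw [pipe, pstep]
        simp only [List.cons_append, List.nil_append, h4]
        simp
      have h3 : PySem.Chars.isIn ['w','o','o','w','o','o']
          (pstep ['y','e'] (pstep ['a','y','a'] s)) = false := by
        cases h3' : PySem.Chars.isIn ['w','o','o','w','o','o']
            (pstep ['y','e'] (pstep ['a','y','a'] s)) with
        | false => rfl
        | true =>
          have he : pstep ['w','o','o'] (pstep ['y','e'] (pstep ['a','y','a'] s))
              = pstep ['y','e'] (pstep ['a','y','a'] s) := by
            rw [pstep]
            simp only [List.cons_append, List.nil_append, h3']
            simp
          have hw : ('w' : Char) ∈ pipe s := by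
            rw [epipe, he]
            exact mem_rep (by decide) (by decide)
              (((PySem.Chars.isIn_iff_infix _ _).mp h3').subset (by simp))
          exact absurd (hmem _ hw) (by decide)
      have e3 : pstep ['w','o','o'] (pstep ['y','e'] (pstep ['a','y','a'] s))
          = rep ['w','o','o'] (pstep ['y','e'] (pstep ['a','y','a'] s)) := by
        rw [pstep]
        simp only [List.cons_append, List.nil_append, h3]
        simp
      have h2 : PySem.Chars.isIn ['y','e','y','e'] (pstep ['a','y','a'] s) = false := by
        cases h2' : PySem.Chars.isIn ['y','e','y','e'] (pstep ['a','y','a'] s) with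
        | false => rfl
        | true =>
          have he : pstep ['y','e'] (pstep ['a','y','a'] s) = pstep ['a','y','a'] s := by
            rw [pstep]
            simp only [List.cons_append, List.nil_append, h2']
            simp
          have hyin : ('e' : Char) ∈ pipe s := by
            rw [epipe, e3, he]
            exact mem_rep (by decide) (by decide)
              (mem_rep (by decide) (by decide)
                (((PySem.Chars.isIn_iff_infix _ _).mp h2').subset (by simp)))
          exact absurd (hmem _ hyin) (by decide)
      have e2 : pstep ['y','e'] (pstep ['a','y','a'] s)
          = rep ['y','e'] (pstep ['a','y','a'] s) := by
        rw [pstep]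
        simp only [List.cons_append, List.nil_append, h2]
        simp
      have h1 : PySem.Chars.isIn ['a','y','a','a','y','a'] s = false := by
        cases h1' : PySem.Chars.isIn ['a','y','a','a','y','a'] s with
        | false => rfl
        | true =>
          have he : pstep ['a','y','a'] s = s := by
            rw [pstep]
            simp only [List.cons_append, List.nil_append, h1']
            simp
          have hya : ['y','a'] <:+: s :=
            List.IsInfix.trans ⟨['a'], ['a','y','a'], rfl⟩ ((PySem.Chars.isIn_iff_infix _ _).mp h1')
          have hyin : ('y' : Char) ∈ pipe s := by
            rw [epipe, e3, e2, he]
            exact (surv_ma_ya (infix_surv_disjoint (p := ['w','o','o'])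
              (q := ['y','a']) (by decide) (by intro c hc; fin_cases hc <;> simp)
              (surv_ye_ya hya))).subset (by simp)
          exact absurd (hmem _ hyin) (by decide)
      have e1 : pstep ['a','y','a'] s = rep ['a','y','a'] s := by
        rw [pstep]
        simp only [List.cons_append, List.nil_append, h1]
        simp
      have e4 : pipe s = r4 s := by
        rw [epipe, e3, e2, e1, r4, r3]
      have hp : parseB s = true := by
        refine spaces_to_parse s.length s le_rfl ?_
        rw [← e4]
        rw [PySem.Chars.strIsspace] at hss
        exact (Bool.and_eq_true_iff.mp hss).2
      rcases Bool.or_eq_true_iff.mp hd' with h' | hm4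
      rcases Bool.or_eq_true_iff.mp h' with h'' | hw3
      rcases Bool.or_eq_true_iff.mp h'' with ha1 | hy2
      · exact absurd ha1 (by simp [h1])
      · have : PySem.Chars.isIn ['y','e','y','e'] (pstep ['a','y','a'] s) = true := by
          rw [e1, PySem.Chars.isIn_iff_infix]
          exact surv_aya_yeye ((PySem.Chars.isIn_iff_infix _ _).mp hy2)
        exact absurd this (by simp [h2])
      · have : PySem.Chars.isIn ['w','o','o','w','o','o']
            (pstep ['y','e'] (pstep ['a','y','a'] s)) = true := by
          rw [e2, e1, PySem.Chars.isIn_iff_infix]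
          exact infix_surv_disjoint (p := ['y','e']) (q := ['w','o','o','w','o','o'])
            (by decide) (by intro c hc; fin_cases hc <;> simp)
            (infix_surv_disjoint (p := ['a','y','a']) (q := ['w','o','o','w','o','o'])
              (by decide) (by intro c hc; fin_cases hc <;> simp)
              ((PySem.Chars.isIn_iff_infix _ _).mp hw3))
        exact absurd this (by simp [h3])
      · have : PySem.Chars.isIn ['m','a','m','a']
            (pstep ['w','o','o'] (pstep ['y','e'] (pstep ['a','y','a'] s))) = true := by
          rw [e3, e2, e1, PySem.Chars.isIn_iff_infix]
          exact mama_parse_surv s hp ((PySem.Chars.isIn_iff_infix _ _).mp hm4)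
        exact absurd this (by simp [h4])

theorem step_toList (i b : String) (hi : i.toList ≠ []) :
    (if PySem.Str.isIn (i ++ i) b = false then PySem.Str.replace b i " " else b).toList
      = pstep i.toList b.toList := by
  rw [pstep]
  have hin : PySem.Str.isIn (i ++ i) b = PySem.Chars.isIn (i.toList ++ i.toList) b.toList := by
    rw [PySem.Str.isIn_eq, String.toList_append]
  rw [hin]
  split
  · rw [PySem.Str.toList_replace, show (" " : String).toList = [' '] from by decide,
      replace_eq_rep i.toList hi b.toList]
  · rfl

theorem word_eq (w : String) :
    (PySem.Str.strIsspace ((["aya", "ye", "woo", "ma"] : List String).foldl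
        (fun b i => if PySem.Str.isIn (i ++ i) b = false then PySem.Str.replace b i " " else b) w))
      = (!w.toList.isEmpty
          && !((["aya", "ye", "woo", "ma"] : List String).any (fun s => PySem.Str.isIn (s ++ s) w))
          && parseB w.toList) := by
  have hfold : ((["aya", "ye", "woo", "ma"] : List String).foldl
      (fun b i => if PySem.Str.isIn (i ++ i) b = false then PySem.Str.replace b i " " else b) w).toList
      = pipe w.toList := by
    simp only [List.foldl_cons, List.foldl_nil]
    rw [pipe]
    rw [step_toList "ma" _ (by decide), step_toList "woo" _ (by decide),
      step_toList "ye" _ (by decide), step_toList "aya" _ (by decide),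
      show ("aya" : String).toList = ['a','y','a'] from by decide,
      show ("ye" : String).toList = ['y','e'] from by decide,
      show ("woo" : String).toList = ['w','o','o'] from by decide,
      show ("ma" : String).toList = ['m','a'] from by decide]
  have hlhs : PySem.Str.strIsspace ((["aya", "ye", "woo", "ma"] : List String).foldl
      (fun b i => if PySem.Str.isIn (i ++ i) b = false then PySem.Str.replace b i " " else b) w)
      = PySem.Chars.strIsspace (pipe w.toList) := by
    show PySem.Chars.strIsspace _ = _
    rw [hfold]
  rw [hlhs, pipe_main]
  have hany : ((["aya", "ye", "woo", "ma"] : List String).any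
      (fun s => PySem.Str.isIn (s ++ s) w))
      = (PySem.Chars.isIn ['a','y','a','a','y','a'] w.toList
          || PySem.Chars.isIn ['y','e','y','e'] w.toList
          || PySem.Chars.isIn ['w','o','o','w','o','o'] w.toList
          || PySem.Chars.isIn ['m','a','m','a'] w.toList) := by
    simp only [List.any_cons, List.any_nil, PySem.Str.isIn_eq, String.toList_append]
    show (PySem.Chars.isIn ['a','y','a','a','y','a'] w.toList
        || (PySem.Chars.isIn ['y','e','y','e'] w.toList
        || (PySem.Chars.isIn ['w','o','o','w','o','o'] w.toList
        || (PySem.Chars.isIn ['m','a','m','a'] w.toList || false)))) = _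
    simp [Bool.or_assoc]
  rw [hany]

theorem solution_eq_alt (babbling : List String) : solution babbling = solution_alt babbling := by
  rw [solution, solution_alt]
  have hfun : (fun (answer : Int) (b0 : String) =>
      let b := (["aya", "ye", "woo", "ma"] : List String).foldl
        (fun b i => if PySem.Str.isIn (i ++ i) b = false then PySem.Str.replace b i " " else b) b0
      if PySem.Str.strIsspace b then answer + 1 else answer)
      = (fun (count : Int) (w : String) =>
        if !w.toList.isEmpty
            && !((["aya", "ye", "woo", "ma"] : List String).any (fun s => PySem.Str.isIn (s ++ s) w))
            && parseB w.toList
        then count + 1 else count) := by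
    funext answer b0
    show (if PySem.Str.strIsspace ((["aya", "ye", "woo", "ma"] : List String).foldl
        (fun b i => if PySem.Str.isIn (i ++ i) b = false then PySem.Str.replace b i " " else b) b0)
      then answer + 1 else answer) = _
    rw [word_eq b0]
  rw [hfun]

-- ===== VERDICT (by name: the statement is the Claim_ definition above) =====
theorem solution_spec : Claim_equal_solution := by
  intro babbling _
  unfold Spec_solution
  exact solution_eq_alt babbling
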